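-- pv_equiv track=rewrite | github.com/sergey3bv/divine-blossom | scripts/debug_upload_harness.py | chunk_ranges
-- ===== SOURCE A (Python) =====
-- def chunk_ranges(file_size: int, chunk_size: int) -> list[tuple[int, int]]:
--     ranges: list[tuple[int, int]] = []
--     start = 0
--     while start < file_size:
--         end = min(start + chunk_size, file_size)
--         ranges.append((start, end))
--         start = end
--     return ranges
-- ===== SOURCE B (Python) =====
-- def chunk_ranges(file_size: int, chunk_size: int) -> list[tuple[int, int]]:
--     n = (file_size + chunk_size - 1) // chunk_size if file_size > 0 else 0
--     return [(i * chunk_size, min((i + 1) * chunk_size, file_size)) for i in range(n)]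
-- ===== Notes on version B (the rewrite author's own statement) =====
-- stated objective: alternative
-- what changed: B computes the chunk count by ceiling division and derives each (start, end) pair independently from its index, instead of threading start=end through a while loop.
-- outside the precondition, e.g. on chunk_ranges(10, 0): A does not finish within the time limit, B raises ZeroDivisionError; on chunk_ranges(10, -3): A does not finish within the time limit, B returns []
import Mathlib
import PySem

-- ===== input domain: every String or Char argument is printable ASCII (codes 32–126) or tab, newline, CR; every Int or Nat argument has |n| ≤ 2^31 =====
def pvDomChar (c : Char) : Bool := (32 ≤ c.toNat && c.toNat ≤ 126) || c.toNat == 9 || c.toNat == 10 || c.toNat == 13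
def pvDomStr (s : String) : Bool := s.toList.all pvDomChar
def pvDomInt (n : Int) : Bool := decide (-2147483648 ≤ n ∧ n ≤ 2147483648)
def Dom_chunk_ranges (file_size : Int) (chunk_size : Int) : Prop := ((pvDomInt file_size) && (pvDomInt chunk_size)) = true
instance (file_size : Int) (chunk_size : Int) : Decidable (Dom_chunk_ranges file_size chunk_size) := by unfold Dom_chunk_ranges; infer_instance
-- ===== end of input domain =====

-- B derives each (start, end) pair directly from its chunk index via ceiling division,
-- instead of A's while loop threading start = end (objective: alternative decomposition).

-- ===== PORT A =====
-- A's while loop; the fuel argument only makes the recursion total (inside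
-- Pre_chunk_ranges the loop body runs at most file_size.toNat times).
def chunkRangesLoop (file_size : Int) (chunk_size : Int) (start : Int)
    (ranges : List (Int × Int)) (fuel : Nat) : List (Int × Int) :=
  match fuel with
  | 0 => ranges
  | fuel + 1 =>
      if start < file_size then
        let e := min (start + chunk_size) file_size
        chunkRangesLoop file_size chunk_size e (ranges ++ [(start, e)]) fuel
      else ranges

def chunk_ranges (file_size : Int) (chunk_size : Int) : List (Int × Int) :=
  chunkRangesLoop file_size chunk_size 0 [] file_size.toNat

-- ===== PORT B =====
def chunk_ranges_alt (file_size : Int) (chunk_size : Int) : List (Int × Int) :=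
  let n : Int := if 0 < file_size
    then PySem.Int.floordiv (file_size + chunk_size - 1) chunk_size else 0
  (PySem.List.pyRange 0 n 1).map
    (fun i => (i * chunk_size, min ((i + 1) * chunk_size) file_size))

-- ===== PRECONDITION & SPEC =====
-- Pre_ excludes chunk_size ≤ 0 with 0 < file_size: there A's while loop never terminates.
def Pre_chunk_ranges (file_size : Int) (chunk_size : Int) : Prop :=
  file_size ≤ 0 ∨ 0 < chunk_size
instance (file_size : Int) (chunk_size : Int) : Decidable (Pre_chunk_ranges file_size chunk_size) := by unfold Pre_chunk_ranges; infer_instance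

def pvWitness_chunk_ranges : Int × Int := (10, 3)

def Spec_chunk_ranges (file_size : Int) (chunk_size : Int) (out : List (Int × Int)) : Prop := out = chunk_ranges_alt file_size chunk_size
instance (file_size : Int) (chunk_size : Int) (out : List (Int × Int)) : Decidable (Spec_chunk_ranges file_size chunk_size out) := by unfold Spec_chunk_ranges; infer_instance

-- ===== CLAIM (what is proved, stated in full; the proofs are below) =====
def Claim_equal_chunk_ranges : Prop := ∀ (file_size : Int) (chunk_size : Int), Dom_chunk_ranges file_size chunk_size → Pre_chunk_ranges file_size chunk_size → Spec_chunk_ranges file_size chunk_size (chunk_ranges file_size chunk_size)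

-- ===== LEMMAS AND PROOFS =====

-- ===== VERDICT (by name: the statement is the Claim_ definition above) =====

theorem chunkRangesLoop_stop (fs cs start : Int) (acc : List (Int × Int)) (fuel : Nat)
    (h : fs ≤ start) : chunkRangesLoop fs cs start acc fuel = acc := by
  cases fuel with
  | zero => rfl
  | succ fuel => simp [chunkRangesLoop, not_lt.mpr h]

theorem chunkRangesLoop_inv (fs cs : Int) (hcs : 0 < cs) (n : Int)
    (hn : PySem.Int.floordiv (fs + cs - 1) cs = n)
    (fuel : Nat) (k : Int) (acc : List (Int × Int))
    (hfuel : fs - k * cs ≤ fuel) :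
    chunkRangesLoop fs cs (k * cs) acc fuel =
      acc ++ (PySem.List.pyRange k n 1).map
        (fun i => (i * cs, min ((i + 1) * cs) fs)) := by
  obtain ⟨hn1, hn2⟩ := (PySem.Int.floordiv_eq_iff_of_pos hcs).mp hn
  have key : ∀ j : Int, j * cs < fs ↔ j < n := by
    intro j
    constructor
    · intro h
      nlinarith
    · intro h
      nlinarith [mul_le_mul_of_nonneg_right (by omega : j + 1 ≤ n) (le_of_lt hcs)]
  induction fuel generalizing k acc with
  | zero =>
      have : ¬ k < n := by rw [← key]; omega
      rw [PySem.List.pyRange_one_eq_nil (by omega)]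
      simp [chunkRangesLoop]
  | succ fuel ih =>
      by_cases hk : k * cs < fs
      swap
      · have hkn : ¬ k < n := fun h => hk ((key k).mpr h)
        rw [PySem.List.pyRange_one_eq_nil (by omega)]
        simp [chunkRangesLoop, hk]
      · rw [PySem.List.pyRange_one_cons ((key k).mp hk)]
        simp only [chunkRangesLoop, if_pos hk]
        have hkc : k * cs + cs = (k + 1) * cs := by ring
        by_cases hlast : (k + 1) * cs ≤ fs
        · have he : min (k * cs + cs) fs = (k + 1) * cs := by
            rw [hkc]; exact min_eq_left hlast
          rw [he, ih (k + 1) _ (by push_cast at hfuel ⊢; linarith)]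
          simp [min_eq_left hlast]
        · have he : min (k * cs + cs) fs = fs := by
            rw [hkc]; exact min_eq_right (by linarith)
          rw [he, chunkRangesLoop_stop fs cs fs _ fuel le_rfl]
          have : ¬ (k + 1) < n := by rw [← key]; omega
          rw [PySem.List.pyRange_one_eq_nil (by omega)]
          have he2 : min ((k + 1) * cs) fs = fs := min_eq_right (by linarith)
          simp [he2]

theorem chunk_ranges_spec : Claim_equal_chunk_ranges := by
  intro fs cs _hdom hpre
  unfold Spec_chunk_ranges chunk_ranges chunk_ranges_alt
  by_cases hfs : 0 < fs
  · have hcs : 0 < cs := by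
      rcases hpre with h | h
      · omega
      · exact h
    have h0 : (0 : Int) = 0 * cs := by ring
    rw [if_pos hfs, h0,
      chunkRangesLoop_inv fs cs hcs _ rfl fs.toNat 0 []
        (by simp)]
    simp
  · have : fs.toNat = 0 := by omega
    rw [this, if_neg hfs]
    simp [chunkRangesLoop]
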